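-- pv_equiv track=rewrite | github.com/isblab/pickET | plotting/plot_particlewise_recall_czi.py | format_particle_name
-- ===== SOURCE A (Python) =====
-- def format_particle_name(name):
--     out_str = []
--     counter = 0
--     for s in name.split("_"):
--         out_str.append(s)
--         counter += 1
--         if counter % 2 == 0:
--             out_str.append("\n")
--
--     return " ".join(out_str)
-- ===== SOURCE B (Python) =====
-- def format_particle_name(name):
--     tokens = name.split("_")
--     groups = []
--     while tokens:
--         pair, tokens = tokens[:2], tokens[2:]
--         groups.append(" ".join(pair + ["\n"]) if len(pair) == 2 else pair[0])
--     return " ".join(groups)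
-- ===== Notes on version B (the rewrite author's own statement) =====
-- stated objective: alternative
-- what changed: Replaces A's flat token pass with a running parity counter by a pair-chunking loop that slices two tokens at a time and nests a per-pair join inside the outer join.
import Mathlib
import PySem

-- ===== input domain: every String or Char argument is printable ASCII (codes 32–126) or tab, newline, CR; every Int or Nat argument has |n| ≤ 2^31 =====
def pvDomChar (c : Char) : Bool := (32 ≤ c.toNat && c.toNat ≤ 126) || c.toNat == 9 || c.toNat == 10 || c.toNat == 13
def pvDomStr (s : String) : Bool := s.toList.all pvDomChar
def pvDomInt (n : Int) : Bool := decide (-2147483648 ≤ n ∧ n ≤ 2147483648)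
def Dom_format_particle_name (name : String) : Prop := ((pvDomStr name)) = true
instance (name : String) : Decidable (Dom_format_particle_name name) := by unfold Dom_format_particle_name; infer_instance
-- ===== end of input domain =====

-- B restructures A's single counter-driven pass into a pair-chunking loop (alternative decomposition, same cost).

-- ===== PORT A =====
-- A: one pass over the tokens with a running counter; after every second token a "\n" is appended.
def format_particle_name (name : String) : String :=
  let res := (PySem.Chars.splitOn name.toList "_".toList).foldl
    (fun (st : List (List Char) × Int) s =>
      let out_str := st.1 ++ [s]
      let counter := st.2 + 1
      if PySem.Int.mod counter 2 = 0 then (out_str ++ [['\n']], counter) else (out_str, counter))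
    ([], 0)
  String.ofList (PySem.Chars.join [' '] res.1)

-- ===== PORT B =====
-- B: chunk the tokens two at a time; a full pair becomes the pre-joined group "a b \n", a lone trailing token stays itself.
def pvGroups : List (List Char) → List (List Char)
  | a :: b :: rest => PySem.Chars.join [' '] [a, b, ['\n']] :: pvGroups rest
  | [a] => [a]
  | [] => []

def format_particle_name_alt (name : String) : String :=
  String.ofList (PySem.Chars.join [' '] (pvGroups (PySem.Chars.splitOn name.toList "_".toList)))

-- ===== PRECONDITION & SPEC =====
def Spec_format_particle_name (name : String) (out : String) : Prop := out = format_particle_name_alt name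
instance (name : String) (out : String) : Decidable (Spec_format_particle_name name out) := by unfold Spec_format_particle_name; infer_instance

-- ===== CLAIM (what is proved, stated in full; the proofs are below) =====
def Claim_equal_format_particle_name : Prop := ∀ (name : String), Dom_format_particle_name name → Spec_format_particle_name name (format_particle_name name)

-- ===== LEMMAS AND PROOFS =====

-- A's flat output list, characterised structurally (two tokens then "\n").
def pvFlatA : List (List Char) → List (List Char)
  | a :: b :: rest => a :: b :: ['\n'] :: pvFlatA rest
  | [a] => [a]
  | [] => []

theorem pvLoopA (ts : List (List Char)) (acc : List (List Char)) (c : Int)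
    (hc : PySem.Int.mod c 2 = 0) :
    ts.foldl (fun (st : List (List Char) × Int) s =>
      let out_str := st.1 ++ [s]
      let counter := st.2 + 1
      if PySem.Int.mod counter 2 = 0 then (out_str ++ [['\n']], counter) else (out_str, counter))
      (acc, c)
    = (acc ++ pvFlatA ts, c + ts.length) := by
  have hm : ∀ a : Int, PySem.Int.mod a 2 = a % 2 := fun a => PySem.Int.mod_eq_emod_of_pos (by omega)
  rw [hm] at hc
  match ts with
  | [] => simp [pvFlatA]
  | [a] =>
    simp [List.foldl, pvFlatA]
    omega
  | a :: b :: rest =>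
    have h1 : ¬ PySem.Int.mod (c + 1) 2 = 0 := by rw [hm]; omega
    have h2 : PySem.Int.mod (c + 1 + 1) 2 = 0 := by rw [hm]; omega
    have ih := pvLoopA rest (acc ++ [a] ++ [b] ++ [['\n']]) (c + 1 + 1) h2
    rw [List.foldl_cons, List.foldl_cons]
    simp only [if_neg h1, if_pos h2]
    rw [ih]
    refine Prod.ext ?_ ?_
    · simp [pvFlatA]
    · simp; omega
termination_by ts.length

theorem pvGroups_ne_nil (ts : List (List Char)) (h : ts ≠ []) : pvGroups ts ≠ [] := by
  match ts with
  | [a] => simp [pvGroups]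
  | a :: b :: rest => simp [pvGroups]

theorem pvFlatA_ne_nil (ts : List (List Char)) (h : ts ≠ []) : pvFlatA ts ≠ [] := by
  match ts with
  | [a] => simp [pvFlatA]
  | a :: b :: rest => simp [pvFlatA]

theorem pvJoin_append (sep : List Char) (xs ys : List (List Char)) (hx : xs ≠ []) (hy : ys ≠ []) :
    PySem.Chars.join sep (xs ++ ys) = PySem.Chars.join sep xs ++ sep ++ PySem.Chars.join sep ys := by
  match xs with
  | [p] =>
    match ys with
    | q :: ys' => simp [PySem.Chars.join_cons_cons, PySem.Chars.join_singleton]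
  | p :: p' :: xs' =>
    have ih := pvJoin_append sep (p' :: xs') ys (by simp) hy
    simp only [List.cons_append, PySem.Chars.join_cons_cons] at *
    simp [ih]
termination_by xs.length

theorem pvJoinGroups (ts : List (List Char)) :
    PySem.Chars.join [' '] (pvGroups ts) = PySem.Chars.join [' '] (pvFlatA ts) := by
  match ts with
  | [] => rfl
  | [a] => rfl
  | a :: b :: rest =>
    by_cases h : rest = []
    · subst h
      simp [pvGroups, pvFlatA, PySem.Chars.join_singleton]
    · have ih := pvJoinGroups rest
      have e1 : pvGroups (a :: b :: rest)
          = [PySem.Chars.join [' '] [a, b, ['\n']]] ++ pvGroups rest := by simp [pvGroups]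
      have e2 : pvFlatA (a :: b :: rest) = [a, b, ['\n']] ++ pvFlatA rest := by simp [pvFlatA]
      rw [e1, e2, pvJoin_append _ _ _ (by simp) (pvGroups_ne_nil rest h),
          pvJoin_append _ _ _ (by simp) (pvFlatA_ne_nil rest h),
          PySem.Chars.join_singleton, ih]
termination_by ts.length

-- ===== VERDICT (by name: the statement is the Claim_ definition above) =====
theorem format_particle_name_spec : Claim_equal_format_particle_name := by
  intro name _
  unfold Spec_format_particle_name format_particle_name format_particle_name_alt
  rw [pvLoopA _ [] 0 (by decide), pvJoinGroups]
  simp
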